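-- pv_equiv track=rewrite | github.com/wslund/FDA-Tracker | scraping.py | pick_out_day
-- ===== SOURCE A (Python) =====
-- def pick_out_day(line):
--     days = range(1, 32)
--     days = list(days)
--     days = map(str, days)
--     days = list(days)
--
--     day = ""
--
--
--     for i in days:
--         d = i
--         for k in line:
--             word = k
--             if d == word:
--                 day = d
--                 day = str(day)
--                 day = day.zfill(2)
--
--     return day.zfill(2)
-- ===== SOURCE B (Python) =====
-- DAY_STRINGS = tuple(str(d) for d in range(1, 32))
--
--
-- def pick_out_day(line):
--     best = 0
--     for k in line:
--         if k in DAY_STRINGS: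
--             v = int(k)
--             if v > best:
--                 best = v
--     return str(best).zfill(2)
-- ===== Notes on version B (the rewrite author's own statement) =====
-- stated objective: faster
-- what changed: Replaces A's 31 rescans of line (one per candidate day string, last match winning) with a single pass over line keeping a running maximum day number, zero-padded at the end.
import Mathlib
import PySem

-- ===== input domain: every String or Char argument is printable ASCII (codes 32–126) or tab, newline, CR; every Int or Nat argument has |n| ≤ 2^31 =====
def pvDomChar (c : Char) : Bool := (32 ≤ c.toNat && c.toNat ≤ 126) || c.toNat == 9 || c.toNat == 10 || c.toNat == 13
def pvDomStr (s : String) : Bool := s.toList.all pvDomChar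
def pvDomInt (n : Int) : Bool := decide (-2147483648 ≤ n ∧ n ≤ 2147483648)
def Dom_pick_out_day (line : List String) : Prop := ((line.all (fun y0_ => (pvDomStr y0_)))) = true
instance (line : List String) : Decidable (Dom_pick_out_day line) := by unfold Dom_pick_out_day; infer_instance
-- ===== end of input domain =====

-- B replaces A's 31 rescans of `line` (one scan per candidate day, last match winning)
-- with a single pass over `line` keeping a running maximum day number (simpler, one pass).

-- ===== PORT A =====
def pick_out_day (line : List String) : String :=
  -- days = list(map(str, list(range(1, 32))))
  let days : List String := (PySem.List.pyRange 1 32 1).map PySem.Int.toStr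
  -- day = ""; for i in days: for k in line: if d == word: day = d; day = str(day); day = day.zfill(2)
  let day : String :=
    days.foldl (fun day d =>
      line.foldl (fun day word =>
        if d == word then PySem.Str.zfill d 2 else day) day) ""
  PySem.Str.zfill day 2

-- ===== PORT B =====
-- DAY_STRINGS = tuple(str(d) for d in range(1, 32))
def pvDayStrings : List String := (PySem.List.pyRange 1 32 1).map PySem.Int.toStr

def pick_out_day_alt (line : List String) : String :=
  let best : Int :=
    line.foldl (fun best k =>
      if pvDayStrings.contains k then
        -- v = int(k): k equals one of the fixed day strings, so int() always succeeds here
        match PySem.Int.ofStr? k with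
        | some v => if v > best then v else best
        | none => best
      else best) 0
  PySem.Str.zfill (PySem.Int.toStr best) 2

-- ===== PRECONDITION & SPEC =====
def Spec_pick_out_day (line : List String) (out : String) : Prop := out = pick_out_day_alt line
instance (line : List String) (out : String) : Decidable (Spec_pick_out_day line out) := by unfold Spec_pick_out_day; infer_instance

-- ===== CLAIM (what is proved, stated in full; the proofs are below) =====
def Claim_equal_pick_out_day : Prop := ∀ (line : List String), Dom_pick_out_day line → Spec_pick_out_day line (pick_out_day line)

-- ===== LEMMAS AND PROOFS =====

-- value of a list element for B's running maximum
def pvW (k : String) : Int :=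
  if pvDayStrings.contains k then (PySem.Int.ofStr? k).getD 0 else 0

-- max of pvW over a list
def pvF : List String → Int
  | [] => 0
  | k :: t => max (pvW k) (pvF t)

-- decidable facts about the 31 concrete day strings
theorem pvDay_facts : ∀ s ∈ pvDayStrings,
    PySem.Int.ofStr? s = some ((PySem.Int.ofStr? s).getD 0) ∧
    1 ≤ (PySem.Int.ofStr? s).getD 0 ∧
    PySem.Int.toStr ((PySem.Int.ofStr? s).getD 0) = s ∧
    PySem.Str.zfill (PySem.Str.zfill s 2) 2 = PySem.Str.zfill s 2 := by decide

theorem pvDay_pairwise :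
    pvDayStrings.reverse.Pairwise
      (fun a b => (PySem.Int.ofStr? b).getD 0 ≤ (PySem.Int.ofStr? a).getD 0) := by decide

-- A's inner loop over line: sets day to d.zfill(2) iff d occurs in line
theorem pvInner (line : List String) (d : String) : ∀ (day : String),
    line.foldl (fun day word => if d == word then PySem.Str.zfill d 2 else day) day
      = if line.contains d then PySem.Str.zfill d 2 else day := by
  induction line with
  | nil => intro day; simp
  | cons w t ih =>
    intro day
    simp only [List.foldl_cons, ih, List.contains_cons]
    by_cases h : d == w <;> by_cases h2 : t.contains d <;> simp [h, h2]

-- A's outer loop: last matching day = first match in the reversed day list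
theorem pvOuter {α β : Type} (q : α → Bool) (g : α → β) : ∀ (ds : List α) (acc : β),
    ds.foldl (fun b a => if q a then g a else b) acc
      = match ds.reverse.find? q with
        | some s => g s
        | none => acc := by
  intro ds
  induction ds with
  | nil => intro acc; simp
  | cons a t ih =>
    intro acc
    simp only [List.foldl_cons, ih, List.reverse_cons, List.find?_append]
    cases hf : t.reverse.find? q with
    | some s => simp
    | none =>
      by_cases h : q a <;> simp [List.find?, h]

-- find? on a Pairwise list dominates every later match
theorem pvFindPairwise {α : Type} (R : α → α → Prop) (p : α → Bool) (s : α) :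
    ∀ (l : List α), l.Pairwise R → l.find? p = some s →
      ∀ k ∈ l, p k = true → s = k ∨ R s k := by
  intro l
  induction l with
  | nil => intro _ hfind; simp [List.find?] at hfind
  | cons a t ih =>
    intro hpw hfind k hk hpk
    rw [List.pairwise_cons] at hpw
    by_cases ha : p a
    · have hs : s = a := by
        simp [List.find?, ha] at hfind; exact hfind.symm
      rcases List.mem_cons.mp hk with rfl | hk'
      · exact Or.inl hs
      · exact Or.inr (hs ▸ hpw.1 k hk')
    · have hfind' : t.find? p = some s := by
        simpa [List.find?, ha] using hfind
      rcases List.mem_cons.mp hk with rfl | hk'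
      · exact absurd hpk (by simp [ha])
      · exact ih hpw.2 hfind' k hk' hpk

theorem pvF_ge : ∀ (l : List String) (k : String), k ∈ l → pvW k ≤ pvF l := by
  intro l
  induction l with
  | nil => intro k hk; simp at hk
  | cons a t ih =>
    intro k hk
    rcases List.mem_cons.mp hk with rfl | hk'
    · exact le_max_left _ _
    · exact le_trans (ih k hk') (le_max_right _ _)

theorem pvF_le (v : Int) (hv : 0 ≤ v) :
    ∀ (l : List String), (∀ k ∈ l, pvW k ≤ v) → pvF l ≤ v := by
  intro l
  induction l with
  | nil => intro _; simpa [pvF] using hv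
  | cons a t ih =>
    intro h
    have := h a (List.mem_cons_self ..)
    have := ih (fun k hk => h k (List.mem_cons_of_mem _ hk))
    simp only [pvF]
    omega

theorem pvF_zero : ∀ (l : List String), (∀ k ∈ l, pvW k = 0) → pvF l = 0 := by
  intro l
  induction l with
  | nil => intro _; rfl
  | cons a t ih =>
    intro h
    have := h a (List.mem_cons_self ..)
    have := ih (fun k hk => h k (List.mem_cons_of_mem _ hk))
    simp only [pvF]
    omega

-- B's fold computes the running maximum of pvW
theorem pvBfold : ∀ (l : List String) (b : Int), 0 ≤ b →
    l.foldl (fun best k =>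
      if pvDayStrings.contains k then
        match PySem.Int.ofStr? k with
        | some v => if v > best then v else best
        | none => best
      else best) b = max b (pvF l) := by
  intro l
  induction l with
  | nil => intro b hb; simp [pvF]; omega
  | cons k t ih =>
    intro b hb
    have hstep : (if pvDayStrings.contains k then
        match PySem.Int.ofStr? k with
        | some v => if v > b then v else b
        | none => b
      else b) = max b (pvW k) := by
      unfold pvW
      by_cases hc : pvDayStrings.contains k
      · have hm : k ∈ pvDayStrings := by simpa using hc
        obtain ⟨hsome, hge1, -, -⟩ := pvDay_facts k hm
        obtain ⟨v, hv⟩ : ∃ v, PySem.Int.ofStr? k = some v := ⟨_, hsome⟩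
        rw [hv] at hge1
        simp only [hc, if_true, hv, Option.getD_some]
        simp only [Option.getD_some] at hge1
        by_cases h : v > b
        · rw [if_pos h]; omega
        · rw [if_neg h]; omega
      · simp only [hc, Bool.false_eq_true, if_false]
        omega
    simp only [List.foldl_cons, hstep]
    rw [ih (max b (pvW k)) (le_trans hb (le_max_left _ _))]
    simp only [pvF]
    omega

-- ===== VERDICT (by name: the statement is the Claim_ definition above) =====
theorem pick_out_day_spec : Claim_equal_pick_out_day := by
  intro line _
  show pick_out_day line = pick_out_day_alt line
  have hA : pick_out_day line =
      PySem.Str.zfill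
        (pvDayStrings.foldl (fun day d =>
          line.foldl (fun day word => if d == word then PySem.Str.zfill d 2 else day) day) "") 2 := rfl
  rw [show (fun (day : String) (d : String) =>
        line.foldl (fun day word => if d == word then PySem.Str.zfill d 2 else day) day)
      = fun day d => if line.contains d then PySem.Str.zfill d 2 else day from
      funext fun day => funext fun d => pvInner line d day] at hA
  rw [pvOuter (fun d => line.contains d) (fun d => PySem.Str.zfill d 2)] at hA
  have hB : pick_out_day_alt line =
      PySem.Str.zfill (PySem.Int.toStr (line.foldl (fun best k =>
        if pvDayStrings.contains k then
          match PySem.Int.ofStr? k with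
          | some v => if v > best then v else best
          | none => best
        else best) 0)) 2 := rfl
  rw [pvBfold line 0 le_rfl] at hB
  rw [hA, hB]
  cases hf : pvDayStrings.reverse.find? (fun d => line.contains d) with
  | none =>
    have hnone := List.find?_eq_none.mp hf
    have hz : pvF line = 0 := by
      apply pvF_zero
      intro k hk
      by_cases hm : k ∈ pvDayStrings
      · have hnl := hnone k (List.mem_reverse.mpr hm)
        have hlk : line.contains k = true := by simpa using hk
        exact absurd hlk (by simpa using hnl)
      · simp [pvW, hm]
    rw [hz]
    decide
  | some s =>
    have hps : line.contains s = true := List.find?_some hf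
    have hsl : s ∈ line := by simpa using hps
    have hmem : s ∈ pvDayStrings := List.mem_reverse.mp (List.mem_of_find?_eq_some hf)
    obtain ⟨hsome, hge1, hround, hzz⟩ := pvDay_facts s hmem
    have hws : pvW s = (PySem.Int.ofStr? s).getD 0 := by
      simp [pvW, hmem]
    have hge : (PySem.Int.ofStr? s).getD 0 ≤ pvF line := hws ▸ pvF_ge line s hsl
    have hle : pvF line ≤ (PySem.Int.ofStr? s).getD 0 := by
      apply pvF_le _ (by omega)
      intro k hk
      by_cases hm : k ∈ pvDayStrings
      · have hpk : line.contains k = true := by simpa using hk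
        have := pvFindPairwise _ _ s pvDayStrings.reverse pvDay_pairwise hf k
          (List.mem_reverse.mpr hm) hpk
        rcases this with rfl | hR
        · simp [pvW, hm]
        · simpa [pvW, hm] using hR
      · simp [pvW, hm]
        omega
    have hfv : pvF line = (PySem.Int.ofStr? s).getD 0 := le_antisymm hle hge
    rw [hfv, max_eq_right (by omega), hround, hzz]
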